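-- pv_equiv track=rewrite | github.com/Claire1940/windrosewiki_wiki | tools/youtube_mcp/core/youtube.py | _filter_by_duration
-- ===== SOURCE A (Python) =====
-- from typing import List, Dict, Tuple
--
-- def _filter_by_duration(videos: List[Dict], max_duration: int) -> List[Dict]:
--     """
--     根据时长过滤视频
--
--     Args:
--         videos: 视频列表
--         max_duration: 最大时长（秒）
--
--     Returns:
--         过滤后的视频列表
--     """
--     if not videos:
--         return []
--
--     # 过滤掉超过最大时长的视频
--     filtered = [
--         v for v in videos
--         if v.get('duration_seconds', 0) <= max_duration
--     ]
--
--     # 如果过滤后有视频，返回所有过滤后的视频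
--     if filtered:
--         return filtered
--
--     # 如果所有视频都超时长，返回时长最短的 1 个
--     sorted_by_duration = sorted(
--         videos,
--         key=lambda v: v.get('duration_seconds', float('inf'))
--     )
--     return sorted_by_duration[:1]
-- ===== SOURCE B (Python) =====
-- def _filter_by_duration(videos, max_duration):
--     """Single pass: collect matching videos and track the first shortest video."""
--     if not videos:
--         return []
--     filtered = []
--     shortest = None
--     shortest_key = None
--     for v in videos:
--         if v.get('duration_seconds', 0) <= max_duration:
--             filtered.append(v)
--         k = v.get('duration_seconds', float('inf'))
--         if shortest is None or k < shortest_key: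
--             shortest, shortest_key = v, k
--     return filtered if filtered else [shortest]
-- ===== Notes on version B (the rewrite author's own statement) =====
-- stated objective: alternative
-- what changed: A does two passes (a filter comprehension, then a full stable sort just to take its first element in the fallback); B is one loop that appends matches and tracks the first shortest video with a strict '<' minimum, so the fallback needs no sort.
import Mathlib
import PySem

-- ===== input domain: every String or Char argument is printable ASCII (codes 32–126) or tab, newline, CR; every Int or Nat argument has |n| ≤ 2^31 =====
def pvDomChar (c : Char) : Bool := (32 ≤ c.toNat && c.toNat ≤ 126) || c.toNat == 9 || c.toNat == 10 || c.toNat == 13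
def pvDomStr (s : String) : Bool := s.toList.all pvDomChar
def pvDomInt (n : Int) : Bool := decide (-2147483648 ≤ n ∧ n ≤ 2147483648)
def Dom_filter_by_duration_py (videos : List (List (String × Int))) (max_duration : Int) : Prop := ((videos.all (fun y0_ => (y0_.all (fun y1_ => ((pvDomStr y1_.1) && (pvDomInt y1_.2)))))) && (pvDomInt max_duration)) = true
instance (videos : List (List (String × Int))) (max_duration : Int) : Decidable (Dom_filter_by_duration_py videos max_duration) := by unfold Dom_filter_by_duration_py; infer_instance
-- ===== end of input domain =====

-- B replaces A's two passes (filter comprehension, then a full stable sort for the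
-- fallback) by ONE loop that simultaneously appends matches and tracks the first
-- shortest video, so the fallback needs no sort; objective: alternative single-pass algorithm.

-- stand-in for float('inf') as a sort/comparison key: 2^63, strictly larger than any
-- Int value admitted by Dom (|n| ≤ 2^31), so comparisons are exact on the domain
def pvInf : Int := 9223372036854775808

-- v.get('duration_seconds', 0)  (dict lookup, first matching key)
def pvDur0 (v : List (String × Int)) : Int := (PySem.Dict.mk v).getD "duration_seconds" 0
-- v.get('duration_seconds', float('inf'))  — exact on Dom via the pvInf sentinel
def pvDurI (v : List (String × Int)) : Int := (PySem.Dict.mk v).getD "duration_seconds" pvInf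

-- ===== PORT A =====
def filter_by_duration_py (videos : List (List (String × Int))) (max_duration : Int) : List (List (String × Int)) :=
  if videos = [] then []
  else
    let filtered := videos.filter (fun v => pvDur0 v ≤ max_duration)
    if filtered ≠ [] then filtered
    else
      -- sorted(videos, key=...)[:1] ; [:1] is List.take 1
      (PySem.List.sorted videos (fun v => pvDurI v) false).take 1

-- ===== PORT B =====
-- loop body: append v to filtered when short enough; keep the first strict minimum
def pvAltStep (max_duration : Int)
    (st : List (List (String × Int)) × Option ((List (String × Int)) × Int))
    (v : List (String × Int)) :
    List (List (String × Int)) × Option ((List (String × Int)) × Int) :=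
  let fl := if pvDur0 v ≤ max_duration then st.1 ++ [v] else st.1
  let k := pvDurI v
  let best :=
    match st.2 with
    | none => some (v, k)
    | some (b, bk) => if k < bk then some (v, k) else some (b, bk)
  (fl, best)

def filter_by_duration_py_alt (videos : List (List (String × Int))) (max_duration : Int) : List (List (String × Int)) :=
  if videos = [] then []
  else
    let st := videos.foldl (pvAltStep max_duration) ([], none)
    if st.1 ≠ [] then st.1
    else
      match st.2 with
      | some (b, _) => [b]
      | none => []

-- ===== PRECONDITION & SPEC =====
def Spec_filter_by_duration_py (videos : List (List (String × Int))) (max_duration : Int) (out : List (List (String × Int))) : Prop := out = filter_by_duration_py_alt videos max_duration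
instance (videos : List (List (String × Int))) (max_duration : Int) (out : List (List (String × Int))) : Decidable (Spec_filter_by_duration_py videos max_duration out) := by unfold Spec_filter_by_duration_py; infer_instance

-- ===== CLAIM (what is proved, stated in full; the proofs are below) =====
def Claim_equal_filter_by_duration_py : Prop := ∀ (videos : List (List (String × Int))) (max_duration : Int), Dom_filter_by_duration_py videos max_duration → Spec_filter_by_duration_py videos max_duration (filter_by_duration_py videos max_duration)

-- ===== LEMMAS AND PROOFS =====

-- running first-strict-minimum of keys, starting from b
def pvBestOf (b : List (String × Int)) (l : List (List (String × Int))) : List (String × Int) :=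
  l.foldl (fun b v => if pvDurI v < pvDurI b then v else b) b

theorem pv_fold_fst (md : Int) :
    ∀ (l acc : List (List (String × Int))) (best : Option ((List (String × Int)) × Int)),
      (l.foldl (pvAltStep md) (acc, best)).1 = acc ++ l.filter (fun v => pvDur0 v ≤ md) := by
  intro l
  induction l with
  | nil => intro acc best; simp
  | cons v t ih =>
    intro acc best
    simp only [List.foldl_cons, List.filter_cons]
    rw [ih]
    by_cases h : pvDur0 v ≤ md
    · simp [pvAltStep, h]
    · simp [pvAltStep, h]

theorem pv_fold_snd (md : Int) :
    ∀ (l acc : List (List (String × Int))) (b : List (String × Int)),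
      (l.foldl (pvAltStep md) (acc, some (b, pvDurI b))).2
        = some (pvBestOf b l, pvDurI (pvBestOf b l)) := by
  intro l
  induction l with
  | nil => intro acc b; simp [pvBestOf]
  | cons v t ih =>
    intro acc b
    simp only [List.foldl_cons]
    by_cases h : pvDurI v < pvDurI b
    · simpa [pvAltStep, h, pvBestOf] using ih _ v
    · simpa [pvAltStep, h, pvBestOf] using ih _ b

theorem pv_head_foldl_insertBy (l : List (List (String × Int))) :
    ∀ (s : List (List (String × Int))) (b : List (String × Int)), s.head? = some b →
      ((l.foldl (fun acc x => PySem.List.insertBy (fun a c => decide (pvDurI a < pvDurI c)) x acc) s)).head?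
        = some (pvBestOf b l) := by
  induction l with
  | nil => intro s b hs; simpa [pvBestOf] using hs
  | cons v t ih =>
    intro s b hs
    cases s with
    | nil => simp at hs
    | cons h rest =>
      simp only [List.head?_cons, Option.some.injEq] at hs
      subst hs
      simp only [List.foldl_cons]
      by_cases hlt : pvDurI v < pvDurI h
      · have hh : (PySem.List.insertBy (fun a c => decide (pvDurI a < pvDurI c)) v (h :: rest)).head? = some v := by
          simp [PySem.List.insertBy, hlt]
        simpa [pvBestOf, hlt] using ih _ v hh
      · have hh : (PySem.List.insertBy (fun a c => decide (pvDurI a < pvDurI c)) v (h :: rest)).head? = some h := by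
          simp [PySem.List.insertBy, hlt]
        simpa [pvBestOf, hlt] using ih _ h hh

-- ===== VERDICT (by name: the statement is the Claim_ definition above) =====
theorem filter_by_duration_py_spec : Claim_equal_filter_by_duration_py := by
  intro videos md _
  unfold Spec_filter_by_duration_py
  cases videos with
  | nil => rfl
  | cons v t =>
    have hne : (v :: t : List (List (String × Int))) ≠ [] := by simp
    have hfst := pv_fold_fst md (v :: t) [] none
    simp only [List.nil_append] at hfst
    have hsnd : ((v :: t).foldl (pvAltStep md) ([], none)).2
        = some (pvBestOf v t, pvDurI (pvBestOf v t)) := by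
      have h1 : pvAltStep md ([], none) v
          = ((if pvDur0 v ≤ md then [v] else []), some (v, pvDurI v)) := by
        simp [pvAltStep]
      simp only [List.foldl_cons, h1]
      exact pv_fold_snd md t _ v
    have hsorted : (PySem.List.sorted (v :: t) (fun x => pvDurI x) false).head?
        = some (pvBestOf v t) := by
      rw [PySem.List.sorted_eq_foldl_insertBy]
      simp only [List.foldl_cons]
      exact pv_head_foldl_insertBy t _ v (by simp [PySem.List.insertBy])
    simp only [filter_by_duration_py, filter_by_duration_py_alt, if_neg hne]
    rw [List.foldl_cons] at hfst hsnd
    by_cases hF : (v :: t).filter (fun x => pvDur0 x ≤ md) = []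
    · rcases hhead : (PySem.List.sorted (v :: t) (fun x => pvDurI x) false) with _ | ⟨m, rest⟩
      · exact absurd ((PySem.List.sorted_eq_nil_iff _ _ _).1 hhead) hne
      · have hm : m = pvBestOf v t := by
          rw [hhead] at hsorted
          simpa using hsorted
        simp [hF, hfst, hsnd, hm]
    · simp [hF, hfst]
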